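-- pv_equiv track=rewrite | github.com/HeegyuKim/language-model | data/util.py | join_utterance
-- ===== SOURCE A (Python) =====
-- def join_utterance(uttrs):
--     last_s = None
--     out = ""
--     speakers = []
--
--     for u in uttrs:
--         s = u["speaker"]
--         t = u["text"]
--
--         if last_s is None:
--             out = t
--         elif s == last_s:
--             out += " " + t
--         else:
--             out += "\n" + t
--
--         speakers.append(s)
--         last_s = s
--
--     return out, speakers
-- ===== SOURCE B (Python) =====
-- def join_utterance(uttrs):
--     # Run-based: group consecutive same-speaker utterances into runs,
--     # then join texts within a run by " " and runs by "\n".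
--     pairs = [(u["speaker"], u["text"]) for u in uttrs]
--     runs = []
--     for s, t in pairs:
--         if runs and runs[-1][0] == s:
--             runs[-1][1].append(t)
--         else:
--             runs.append((s, [t]))
--     text = "\n".join(" ".join(ts) for _, ts in runs)
--     return text, [s for s, _ in pairs]
-- ===== Notes on version B (the rewrite author's own statement) =====
-- stated objective: alternative
-- what changed: Replaces A's per-element separator decision with last_s tracking by grouping consecutive same-speaker utterances into runs, then joining texts inside each run with ' ' and the runs with '\n'.
import Mathlib
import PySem

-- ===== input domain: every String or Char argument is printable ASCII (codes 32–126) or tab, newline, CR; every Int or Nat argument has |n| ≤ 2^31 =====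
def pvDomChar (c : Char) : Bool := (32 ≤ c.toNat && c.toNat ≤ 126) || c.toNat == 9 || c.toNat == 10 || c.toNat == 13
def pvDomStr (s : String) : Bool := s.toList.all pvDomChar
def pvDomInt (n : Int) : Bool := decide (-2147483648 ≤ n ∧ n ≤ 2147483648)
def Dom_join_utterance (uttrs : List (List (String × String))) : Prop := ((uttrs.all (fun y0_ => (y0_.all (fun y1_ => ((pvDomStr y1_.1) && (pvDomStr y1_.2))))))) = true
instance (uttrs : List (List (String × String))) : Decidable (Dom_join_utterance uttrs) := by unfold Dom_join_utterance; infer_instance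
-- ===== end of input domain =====

-- B replaces A's per-element separator decision (last_s tracking) by run-based grouping of
-- consecutive same-speaker utterances followed by a two-level join (objective: alternative).


-- ===== PORT A =====
-- Python dict access u[k]: first-match association-list lookup; the .getD "" default is
-- reached only on inputs excluded by Pre_ (where Python raises KeyError).
def pvGetD (u : List (String × String)) (k : String) : String := (u.lookup k).getD ""

-- loop body of A: state (last_s, out, speakers)
def pvStepA (st : Option String × String × List String) (u : List (String × String)) :
    Option String × String × List String :=
  let s := pvGetD u "speaker"
  let t := pvGetD u "text"
  let out := match st.1 with
    | none => t
    | some ls => if s == ls then st.2.1 ++ " " ++ t else st.2.1 ++ "\n" ++ t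
  (some s, out, st.2.2 ++ [s])

def join_utterance (uttrs : List (List (String × String))) : String × List String :=
  let st := uttrs.foldl pvStepA (none, "", [])
  (st.2.1, st.2.2)

-- ===== PORT B =====
-- loop body of B: append t to the last run if its speaker matches, else start a new run
def pvStepB (runs : List (String × List String)) (p : String × String) :
    List (String × List String) :=
  match runs.getLast? with
  | some last =>
      if last.1 == p.1 then runs.dropLast ++ [(last.1, last.2 ++ [p.2])]
      else runs ++ [(p.1, [p.2])]
  | none => runs ++ [(p.1, [p.2])]

def join_utterance_alt (uttrs : List (List (String × String))) : String × List String :=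
  let pairs := uttrs.map (fun u => (pvGetD u "speaker", pvGetD u "text"))
  let runs := pairs.foldl pvStepB []
  (PySem.Str.join "\n" (runs.map (fun r => PySem.Str.join " " r.2)),
   pairs.map (fun p => p.1))

-- ===== PRECONDITION & SPEC =====
-- Pre_ excludes exactly the inputs where Python A raises KeyError (an utterance dict
-- missing the "speaker" or "text" key); B raises the same KeyError there.
def Pre_join_utterance (uttrs : List (List (String × String))) : Prop :=
  ∀ u ∈ uttrs, (u.lookup "speaker").isSome ∧ (u.lookup "text").isSome

instance (uttrs : List (List (String × String))) : Decidable (Pre_join_utterance uttrs) := by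
  unfold Pre_join_utterance; infer_instance

def pvWitness_join_utterance : (List (List (String × String))) :=
  [[("speaker", "a"), ("text", "hi")], [("speaker", "b"), ("text", "yo")]]

def Spec_join_utterance (uttrs : List (List (String × String))) (out : String × List String) : Prop := out = join_utterance_alt uttrs
instance (uttrs : List (List (String × String))) (out : String × List String) : Decidable (Spec_join_utterance uttrs out) := by unfold Spec_join_utterance; infer_instance

-- ===== CLAIM (what is proved, stated in full; the proofs are below) =====
def Claim_equal_join_utterance : Prop := ∀ (uttrs : List (List (String × String))), Dom_join_utterance uttrs → Pre_join_utterance uttrs → Spec_join_utterance uttrs (join_utterance uttrs)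

-- ===== LEMMAS AND PROOFS =====

-- A's loop body viewed on the extracted (speaker, text) pair
def pvStepA' (st : Option String × String × List String) (p : String × String) :
    Option String × String × List String :=
  let out := match st.1 with
    | none => p.2
    | some ls => if p.1 == ls then st.2.1 ++ " " ++ p.2 else st.2.1 ++ "\n" ++ p.2
  (some p.1, out, st.2.2 ++ [p.1])

def pvRender (runs : List (String × List String)) : String :=
  PySem.Str.join "\n" (runs.map (fun r => PySem.Str.join " " r.2))

lemma chars_join_snoc (sep : List Char) (xs : List (List Char)) (y : List Char) :
    PySem.Chars.join sep (xs ++ [y]) =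
      if xs = [] then y else PySem.Chars.join sep xs ++ sep ++ y := by
  induction xs with
  | nil => simp [PySem.Chars.join_singleton]
  | cons a xs ih =>
    cases xs with
    | nil => simp [PySem.Chars.join_cons_cons, PySem.Chars.join_singleton]
    | cons b xs' =>
      simp only [List.cons_append] at ih ⊢
      rw [PySem.Chars.join_cons_cons, ih]
      simp [PySem.Chars.join_cons_cons, List.append_assoc]

lemma str_join_snoc (sep : String) (xs : List String) (y : String) :
    PySem.Str.join sep (xs ++ [y]) =
      if xs = [] then y else PySem.Str.join sep xs ++ sep ++ y := by
  apply String.toList_inj.mp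
  by_cases h : xs = [] <;>
    simp [h, PySem.Str.toList_join, chars_join_snoc, String.toList_append]

lemma str_join_singleton (sep : String) (y : String) : PySem.Str.join sep [y] = y := by
  apply String.toList_inj.mp
  simp [PySem.Str.toList_join, PySem.Chars.join_singleton]

lemma render_snoc_new (runs : List (String × List String)) (s t : String) :
    pvRender (runs ++ [(s, [t])]) =
      if runs = [] then t else pvRender runs ++ "\n" ++ t := by
  by_cases h : runs = [] <;>
    simp [pvRender, h, str_join_snoc, str_join_singleton, List.map_eq_nil_iff]

lemma render_snoc_app (runs : List (String × List String)) (s s' : String)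
    (ts : List String) (t : String) (hts : ts ≠ []) :
    pvRender (runs ++ [(s, ts ++ [t])]) = pvRender (runs ++ [(s', ts)]) ++ " " ++ t := by
  have h2 : PySem.Str.join " " (ts ++ [t]) = PySem.Str.join " " ts ++ " " ++ t := by
    rw [str_join_snoc]; simp [hts]
  by_cases h : runs = [] <;>
    simp [pvRender, h, str_join_snoc, str_join_singleton, h2, List.map_eq_nil_iff,
      String.append_assoc]

-- Main loop invariant: A's running string equals the rendering of B's runs, A's last_s
-- is the speaker of B's (nonempty) last run, and A's speakers accumulate the pair heads.
lemma main_inv (pairs : List (String × String)) :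
    ∀ (runs : List (String × List String)) (s0 : String) (ts0 : List String)
      (out : String) (sp : List String), ts0 ≠ [] →
      out = pvRender (runs ++ [(s0, ts0)]) →
      (pairs.foldl pvStepA' (some s0, out, sp)).2.1 =
        pvRender (pairs.foldl pvStepB (runs ++ [(s0, ts0)])) ∧
      (pairs.foldl pvStepA' (some s0, out, sp)).2.2 = sp ++ pairs.map (fun p => p.1) := by
  induction pairs with
  | nil => intro runs s0 ts0 out sp hts hout; simpa using hout
  | cons p rest ih =>
    intro runs s0 ts0 out sp hts hout
    obtain ⟨s, t⟩ := p
    by_cases hs : s = s0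
    · subst hs
      have hstepA : pvStepA' (some s, out, sp) (s, t) = (some s, out ++ " " ++ t, sp ++ [s]) := by
        simp [pvStepA']
      have hstepB : pvStepB (runs ++ [(s, ts0)]) (s, t) = runs ++ [(s, ts0 ++ [t])] := by
        simp [pvStepB]
      have hout' : out ++ " " ++ t = pvRender (runs ++ [(s, ts0 ++ [t])]) := by
        rw [render_snoc_app runs s s ts0 t hts, ← hout]
      simpa [List.foldl_cons, hstepA, hstepB, List.append_assoc] using
        ih runs s (ts0 ++ [t]) (out ++ " " ++ t) (sp ++ [s]) (by simp) hout'
    · have hstepA : pvStepA' (some s0, out, sp) (s, t) = (some s, out ++ "\n" ++ t, sp ++ [s]) := by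
        simp [pvStepA', hs]
      have hstepB : pvStepB (runs ++ [(s0, ts0)]) (s, t) =
          (runs ++ [(s0, ts0)]) ++ [(s, [t])] := by
        have h0 : ¬ (s0 == s) = true := by simp [Ne.symm hs]
        simp [pvStepB, h0]
      have hout' : out ++ "\n" ++ t = pvRender ((runs ++ [(s0, ts0)]) ++ [(s, [t])]) := by
        rw [render_snoc_new]; simp [← hout]
      simpa [List.foldl_cons, hstepA, hstepB, List.append_assoc] using
        ih (runs ++ [(s0, ts0)]) s [t] (out ++ "\n" ++ t) (sp ++ [s]) (by simp) hout'

lemma foldA_as_pairs (uttrs : List (List (String × String))) :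
    uttrs.foldl pvStepA (none, "", []) =
      (uttrs.map (fun u => (pvGetD u "speaker", pvGetD u "text"))).foldl pvStepA'
        (none, "", ([] : List String)) := by
  rw [List.foldl_map]; rfl

-- ===== VERDICT (by name: the statement is the Claim_ definition above) =====
theorem join_utterance_spec : Claim_equal_join_utterance := by
  intro uttrs _ _
  unfold Spec_join_utterance join_utterance join_utterance_alt
  rw [foldA_as_pairs]
  set pairs := uttrs.map (fun u => (pvGetD u "speaker", pvGetD u "text")) with hpairs
  cases hp : pairs with
  | nil => rfl
  | cons p rest =>
    obtain ⟨s, t⟩ := p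
    have hstepA : pvStepA' (none, "", ([] : List String)) (s, t) = (some s, t, [s]) := by
      simp [pvStepA']
    have hstepB : pvStepB [] (s, t) = [(s, [t])] := by simp [pvStepB]
    have ht : t = pvRender ([] ++ [(s, [t])]) := by
      rw [render_snoc_new]; simp
    have := main_inv rest [] s [t] t [s] (by simp) ht
    obtain ⟨h1, h2⟩ := this
    simp only [List.foldl_cons, hstepA, hstepB]
    simp only [List.nil_append] at h1
    exact Prod.ext (by simpa using h1) (by simpa using h2)
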